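-- pv_equiv track=rewrite | github.com/rolandshoemaker/BOUND | statman.py | strip_stats
-- ===== SOURCE A (Python) =====
-- def strip_stats(stats):
-- 	success = 0
-- 	referral = 0
-- 	nxrrset = 0
-- 	nxdomain = 0
-- 	recursion = 0
-- 	failure = 0
-- 	duplicate = 0
-- 	for line in stats:
-- 		if line[4].endswith('resulted in successful answer'):
-- 			success += int(line[3])
-- 		elif line[4].endswith('resulted in referral'):
-- 			referral += int(line[3])
-- 		elif line[4].endswith('resulted in nxrrset'):
-- 			nxrrset += int(line[3])
-- 		elif line[4].endswith('resulted in NXDOMAIN'):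
-- 			nxdomain += int(line[3])
-- 		elif line[4].endswith('caused recursion'):
-- 			recursion += int(line[3])
-- 		elif line[4].endswith('resulted in SERVFAIL'):
-- 			failure += int(line[3])
-- 		elif line[4].endswith('duplicate queries received'):
-- 			duplicate += int(line[3])
-- 	return {'successes': success, 'referrals': referral, 'nxrrset': nxrrset, 'nxdomain': nxdomain, 'recursions': recursion, 'failures': failure, 'duplicates': duplicate}
-- ===== SOURCE B (Python) =====
-- _CATS = [
--     ('successes', 'resulted in successful answer'),
--     ('referrals', 'resulted in referral'),
--     ('nxrrset', 'resulted in nxrrset'),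
--     ('nxdomain', 'resulted in NXDOMAIN'),
--     ('recursions', 'caused recursion'),
--     ('failures', 'resulted in SERVFAIL'),
--     ('duplicates', 'duplicate queries received'),
-- ]
--
--
-- def strip_stats(stats):
--     # The seven suffixes are mutually exclusive (no one is a suffix of another,
--     # their final characters even differ), so a separate summing pass per
--     # category returns exactly what A's first-match elif chain accumulates.
--     return {key: sum(int(line[3]) for line in stats if line[4].endswith(suffix))
--             for key, suffix in _CATS}
-- ===== Notes on version B (the rewrite author's own statement) =====
-- stated objective: idiomatic
-- what changed: Replaces A's single pass with seven mutually-branching accumulators by one independent summing pass per category (a dict comprehension of sum(...) over the lines matching that category's suffix), correct because the seven suffixes are mutually exclusive (none is a suffix of another).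
import Mathlib
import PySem

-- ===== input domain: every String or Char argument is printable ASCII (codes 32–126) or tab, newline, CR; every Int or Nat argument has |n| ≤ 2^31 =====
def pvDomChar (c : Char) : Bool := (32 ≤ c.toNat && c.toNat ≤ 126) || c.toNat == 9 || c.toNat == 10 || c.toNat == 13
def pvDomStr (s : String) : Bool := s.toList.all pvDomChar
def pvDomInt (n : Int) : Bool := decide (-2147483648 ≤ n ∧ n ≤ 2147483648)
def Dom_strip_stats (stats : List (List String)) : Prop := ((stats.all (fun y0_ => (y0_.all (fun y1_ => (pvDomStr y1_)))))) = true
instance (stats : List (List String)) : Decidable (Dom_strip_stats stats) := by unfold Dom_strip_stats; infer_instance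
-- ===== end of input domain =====

-- B replaces A's single pass with seven mutually-branching accumulators by one independent
-- summing pass per category; correct because no suffix is a suffix of another (idiomatic).

-- ===== PORT A =====
-- the seven-field return dict of A, as an insertion-ordered association list
def pack (r : Int × Int × Int × Int × Int × Int × Int) : List (String × Int) :=
  [("successes", r.1), ("referrals", r.2.1), ("nxrrset", r.2.2.1), ("nxdomain", r.2.2.2.1),
   ("recursions", r.2.2.2.2.1), ("failures", r.2.2.2.2.2.1), ("duplicates", r.2.2.2.2.2.2)]

-- one iteration of A's for-loop over the seven accumulators
def stripLine (acc : Int × Int × Int × Int × Int × Int × Int) (line : List String) :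
    Int × Int × Int × Int × Int × Int × Int :=
  let s := PySem.List.pyGetD line 4 ""
  let v := (PySem.Int.ofStr? (PySem.List.pyGetD line 3 "")).getD 0
  let (a, b, c, d, e, f, g) := acc
  if PySem.Str.endswith s "resulted in successful answer" then (a + v, b, c, d, e, f, g)
  else if PySem.Str.endswith s "resulted in referral" then (a, b + v, c, d, e, f, g)
  else if PySem.Str.endswith s "resulted in nxrrset" then (a, b, c + v, d, e, f, g)
  else if PySem.Str.endswith s "resulted in NXDOMAIN" then (a, b, c, d + v, e, f, g)
  else if PySem.Str.endswith s "caused recursion" then (a, b, c, d, e + v, f, g)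
  else if PySem.Str.endswith s "resulted in SERVFAIL" then (a, b, c, d, e, f + v, g)
  else if PySem.Str.endswith s "duplicate queries received" then (a, b, c, d, e, f, g + v)
  else (a, b, c, d, e, f, g)

def strip_stats (stats : List (List String)) : List (String × Int) :=
  pack (stats.foldl stripLine (0, 0, 0, 0, 0, 0, 0))

-- ===== PORT B =====
def altCats : List (String × String) :=
  [("successes", "resulted in successful answer"),
   ("referrals", "resulted in referral"),
   ("nxrrset", "resulted in nxrrset"),
   ("nxdomain", "resulted in NXDOMAIN"),
   ("recursions", "caused recursion"),
   ("failures", "resulted in SERVFAIL"),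
   ("duplicates", "duplicate queries received")]

-- one step of B's generator sum: add int(line[3]) when line[4] ends with this category's suffix
def passStep (suffix : String) (acc : Int) (line : List String) : Int :=
  if PySem.Str.endswith (PySem.List.pyGetD line 4 "") suffix then
    acc + (PySem.Int.ofStr? (PySem.List.pyGetD line 3 "")).getD 0
  else acc

-- sum(int(line[3]) for line in stats if line[4].endswith(suffix))
def sumFor (suffix : String) (stats : List (List String)) : Int :=
  stats.foldl (passStep suffix) 0

def strip_stats_alt (stats : List (List String)) : List (String × Int) :=
  altCats.map (fun p => (p.1, sumFor p.2 stats))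

-- ===== PRECONDITION & SPEC =====
-- Pre_ excludes exactly the inputs on which the Python raises: a line with fewer than 5 entries
-- (IndexError on line[4]) or a line matching one of the seven suffixes whose line[3] is not
-- parseable as an int (ValueError on int(line[3])).
def Pre_strip_stats (stats : List (List String)) : Prop :=
  ∀ line ∈ stats, 5 ≤ line.length ∧
    ((altCats.map Prod.snd).any (fun suf => PySem.Str.endswith (line.getD 4 "") suf) = true →
      (PySem.Int.ofStr? (line.getD 3 "")).isSome = true)
instance (stats : List (List String)) : Decidable (Pre_strip_stats stats) := by
  unfold Pre_strip_stats; infer_instance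

def pvWitness_strip_stats : List (List String) :=
  [["q", "r", "s", "3", "query resulted in referral"],
   ["q", "r", "s", "oops", "no match here"]]

def Spec_strip_stats (stats : List (List String)) (out : List (String × Int)) : Prop := out = strip_stats_alt stats
instance (stats : List (List String)) (out : List (String × Int)) : Decidable (Spec_strip_stats stats out) := by unfold Spec_strip_stats; infer_instance

-- ===== CLAIM (what is proved, stated in full; the proofs are below) =====
def Claim_equal_strip_stats : Prop := ∀ (stats : List (List String)), Dom_strip_stats stats → Pre_strip_stats stats → Spec_strip_stats stats (strip_stats stats)

-- ===== LEMMAS AND PROOFS =====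

-- two nonempty strings with different last characters cannot both be suffixes of the same string
lemma ends_excl (s p q : String)
    (hp : p.toList ≠ []) (hq : q.toList ≠ [])
    (hne : p.toList.getLast? ≠ q.toList.getLast?)
    (h : PySem.Str.endswith s p = true) : ¬ PySem.Str.endswith s q = true := by
  intro h2
  simp only [PySem.Str.endswith_eq] at h h2
  rw [PySem.Chars.endswith_iff] at h h2
  obtain ⟨t1, e1⟩ := h
  obtain ⟨t2, e2⟩ := h2
  have g1 : s.toList.getLast? = p.toList.getLast? := by
    rw [← e1]; exact List.getLast?_append_of_ne_nil t1 hp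
  have g2 : s.toList.getLast? = q.toList.getLast? := by
    rw [← e2]; exact List.getLast?_append_of_ne_nil t2 hq
  exact hne (g1.symm.trans g2)

-- A's elif chain on one line, componentwise: each accumulator moves exactly as its own pass does
lemma step_eq (line : List String) (a b c d e f g : Int) :
    stripLine (a, b, c, d, e, f, g) line =
      (passStep "resulted in successful answer" a line,
       passStep "resulted in referral" b line,
       passStep "resulted in nxrrset" c line,
       passStep "resulted in NXDOMAIN" d line,
       passStep "caused recursion" e line,
       passStep "resulted in SERVFAIL" f line,
       passStep "duplicate queries received" g line) := by
  simp only [stripLine, passStep]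
  by_cases h1 : PySem.Str.endswith (PySem.List.pyGetD line 4 "") "resulted in successful answer" = true
  · have n2 := ends_excl _ _ "resulted in referral" (by decide) (by decide) (by decide) h1
    have n3 := ends_excl _ _ "resulted in nxrrset" (by decide) (by decide) (by decide) h1
    have n4 := ends_excl _ _ "resulted in NXDOMAIN" (by decide) (by decide) (by decide) h1
    have n5 := ends_excl _ _ "caused recursion" (by decide) (by decide) (by decide) h1
    have n6 := ends_excl _ _ "resulted in SERVFAIL" (by decide) (by decide) (by decide) h1
    have n7 := ends_excl _ _ "duplicate queries received" (by decide) (by decide) (by decide) h1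
    simp only [if_pos h1, if_neg n2, if_neg n3, if_neg n4, if_neg n5, if_neg n6, if_neg n7]
  ·
    by_cases h2 : PySem.Str.endswith (PySem.List.pyGetD line 4 "") "resulted in referral" = true
    · have n3 := ends_excl _ _ "resulted in nxrrset" (by decide) (by decide) (by decide) h2
      have n4 := ends_excl _ _ "resulted in NXDOMAIN" (by decide) (by decide) (by decide) h2
      have n5 := ends_excl _ _ "caused recursion" (by decide) (by decide) (by decide) h2
      have n6 := ends_excl _ _ "resulted in SERVFAIL" (by decide) (by decide) (by decide) h2
      have n7 := ends_excl _ _ "duplicate queries received" (by decide) (by decide) (by decide) h2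
      simp only [if_neg h1, if_pos h2, if_neg n3, if_neg n4, if_neg n5, if_neg n6, if_neg n7]
    ·
      by_cases h3 : PySem.Str.endswith (PySem.List.pyGetD line 4 "") "resulted in nxrrset" = true
      · have n4 := ends_excl _ _ "resulted in NXDOMAIN" (by decide) (by decide) (by decide) h3
        have n5 := ends_excl _ _ "caused recursion" (by decide) (by decide) (by decide) h3
        have n6 := ends_excl _ _ "resulted in SERVFAIL" (by decide) (by decide) (by decide) h3
        have n7 := ends_excl _ _ "duplicate queries received" (by decide) (by decide) (by decide) h3
        simp only [if_neg h1, if_neg h2, if_pos h3, if_neg n4, if_neg n5, if_neg n6, if_neg n7]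
      ·
        by_cases h4 : PySem.Str.endswith (PySem.List.pyGetD line 4 "") "resulted in NXDOMAIN" = true
        · have n5 := ends_excl _ _ "caused recursion" (by decide) (by decide) (by decide) h4
          have n6 := ends_excl _ _ "resulted in SERVFAIL" (by decide) (by decide) (by decide) h4
          have n7 := ends_excl _ _ "duplicate queries received" (by decide) (by decide) (by decide) h4
          simp only [if_neg h1, if_neg h2, if_neg h3, if_pos h4, if_neg n5, if_neg n6, if_neg n7]
        ·
          by_cases h5 : PySem.Str.endswith (PySem.List.pyGetD line 4 "") "caused recursion" = true
          · have n6 := ends_excl _ _ "resulted in SERVFAIL" (by decide) (by decide) (by decide) h5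
            have n7 := ends_excl _ _ "duplicate queries received" (by decide) (by decide) (by decide) h5
            simp only [if_neg h1, if_neg h2, if_neg h3, if_neg h4, if_pos h5, if_neg n6, if_neg n7]
          ·
            by_cases h6 : PySem.Str.endswith (PySem.List.pyGetD line 4 "") "resulted in SERVFAIL" = true
            · have n7 := ends_excl _ _ "duplicate queries received" (by decide) (by decide) (by decide) h6
              simp only [if_neg h1, if_neg h2, if_neg h3, if_neg h4, if_neg h5, if_pos h6, if_neg n7]
            ·
              by_cases h7 : PySem.Str.endswith (PySem.List.pyGetD line 4 "") "duplicate queries received" = true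
              · simp only [if_neg h1, if_neg h2, if_neg h3, if_neg h4, if_neg h5, if_neg h6, if_pos h7]
              · simp only [if_neg h1, if_neg h2, if_neg h3, if_neg h4, if_neg h5, if_neg h6, if_neg h7]

-- A's one fold over seven accumulators equals B's seven independent folds, componentwise
lemma fold_eq (stats : List (List String)) (a b c d e f g : Int) :
    stats.foldl stripLine (a, b, c, d, e, f, g) =
      (stats.foldl (passStep "resulted in successful answer") a,
       stats.foldl (passStep "resulted in referral") b,
       stats.foldl (passStep "resulted in nxrrset") c,
       stats.foldl (passStep "resulted in NXDOMAIN") d,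
       stats.foldl (passStep "caused recursion") e,
       stats.foldl (passStep "resulted in SERVFAIL") f,
       stats.foldl (passStep "duplicate queries received") g) := by
  induction stats generalizing a b c d e f g with
  | nil => rfl
  | cons line rest ih =>
    simp only [List.foldl_cons, step_eq]
    exact ih _ _ _ _ _ _ _

-- ===== VERDICT (by name: the statement is the Claim_ definition above) =====
theorem strip_stats_spec : Claim_equal_strip_stats := by
  intro stats _ _
  unfold Spec_strip_stats strip_stats strip_stats_alt
  rw [fold_eq]
  rfl
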